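-- pv_equiv track=rewrite | github.com/Angela-OH/Algorithm | 기출문제/2022 KAKAO TECH INTERNSHIP/118666.py | solution
-- ===== SOURCE A (Python) =====
-- def decision(typ, a, b):
--     if typ[a] >= typ[b]:
--         return a
--     else:
--         return b
--
-- def solution(survey, choices):
--     answer = ''
--     typ = {"R": 0, "T": 0, "C": 0, "F": 0, "J": 0, "M": 0, "A": 0, "N":0}
--
--     for i in range(len(survey)):
--         if choices[i] < 4: # 비동의
--             typ[survey[i][0]] += (4 - choices[i])
--         elif choices[i] > 4: # 동의
--             typ[survey[i][1]] += (choices[i] - 4)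
--
--     # 지표 1: R/T
--     answer += decision(typ, 'R', 'T')
--     # 지표 2: C/F
--     answer += decision(typ, 'C', 'F')
--     # 지표 3: J/M
--     answer += decision(typ, 'J', 'M')
--     # 지표 4: A/N
--     answer += decision(typ, 'A', 'N')
--
--     return answer
-- ===== SOURCE B (Python) =====
-- def solution(survey, choices):
--     # Per-indicator scoring: no mutable accumulator — each letter's score is a
--     # standalone filtered sum over the data, and the answer is joined per pair.
--     def score(letter):
--         return sum(4 - c for s, c in zip(survey, choices) if c < 4 and s[0] == letter) \
--              + sum(c - 4 for s, c in zip(survey, choices) if c > 4 and s[1] == letter)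
--     return ''.join(p if score(p) >= score(q) else q for p, q in ("RT", "CF", "JM", "AN"))
-- ===== Notes on version B (the rewrite author's own statement) =====
-- stated objective: alternative
-- what changed: Replaces A's single stateful pass mutating a dict of eight counters with a stateless per-letter formulation: each letter's score is an independent filtered-comprehension sum over the (survey, choice) pairs, and the answer is joined per indicator pair; it trades one mutating pass for eight pure passes.
import Mathlib
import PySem

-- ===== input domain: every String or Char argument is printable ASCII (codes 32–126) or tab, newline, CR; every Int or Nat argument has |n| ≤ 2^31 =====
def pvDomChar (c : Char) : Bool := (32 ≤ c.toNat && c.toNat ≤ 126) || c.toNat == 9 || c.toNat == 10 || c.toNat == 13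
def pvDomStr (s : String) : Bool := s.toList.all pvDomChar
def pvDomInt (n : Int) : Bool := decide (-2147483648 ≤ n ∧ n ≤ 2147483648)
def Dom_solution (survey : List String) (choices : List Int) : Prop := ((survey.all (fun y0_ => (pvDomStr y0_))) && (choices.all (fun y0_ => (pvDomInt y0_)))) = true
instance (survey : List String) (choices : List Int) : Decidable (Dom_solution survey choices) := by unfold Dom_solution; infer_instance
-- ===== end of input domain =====

-- B replaces A's stateful pass over a dict of eight counters by stateless per-letter
-- filtered sums (objective: alternative decomposition; return value only, no mutation).

-- ===== PORT A =====
-- the eight MBTI letters A's dict is initialised with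
def pvKeys : List Char := ['R', 'T', 'C', 'F', 'J', 'M', 'A', 'N']

-- decision(typ, a, b): typ[a] >= typ[b] → a else b (keys always present under Pre_; getD is exact there)
def decisionA (typ : PySem.Dict Char Int) (a b : Char) : Char :=
  if typ.getD b 0 ≤ typ.getD a 0 then a else b

-- one iteration of A's loop body; s = survey[i], c = choices[i].
-- s.toList[0]?/[1]? is Python's s[0]/s[1] for these nonnegative literal indices (none = IndexError);
-- the none branches and a letter outside A's dict (KeyError) are excluded by Pre_solution.
def stepA (typ : PySem.Dict Char Int) (s : String) (c : Int) : PySem.Dict Char Int :=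
  if c < 4 then
    match s.toList[0]? with
    | some ch => typ.modify ch 0 (· + (4 - c))
    | none => typ
  else if 4 < c then
    match s.toList[1]? with
    | some ch => typ.modify ch 0 (· + (c - 4))
    | none => typ
  else typ

def solution (survey : List String) (choices : List Int) : String :=
  let typ0 : PySem.Dict Char Int :=
    PySem.Dict.ofList [('R', 0), ('T', 0), ('C', 0), ('F', 0), ('J', 0), ('M', 0), ('A', 0), ('N', 0)]
  let typ := (PySem.List.pyRange 0 (survey.length : Int) 1).foldl
    (fun typ i => stepA typ (PySem.List.pyGetD survey i "") (PySem.List.pyGetD choices i 0)) typ0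
  String.ofList [decisionA typ 'R' 'T', decisionA typ 'C' 'F', decisionA typ 'J' 'M', decisionA typ 'A' 'N']

-- ===== PORT B =====
-- score(letter): two filtered-comprehension sums over zip(survey, choices);
-- s[0]/s[1] port as toList[0]?/[1]? compared to some letter (the none case, Python's
-- IndexError, is excluded by Pre_solution)
def scoreB (survey : List String) (choices : List Int) (letter : Char) : Int :=
  (((survey.zip choices).filter
      (fun p => decide (p.2 < 4) && (p.1.toList[0]? == some letter))).map (fun p => 4 - p.2)).sum
  + (((survey.zip choices).filter
      (fun p => decide (4 < p.2) && (p.1.toList[1]? == some letter))).map (fun p => p.2 - 4)).sum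

-- ''.join(p if score(p) >= score(q) else q for p, q in ("RT","CF","JM","AN")), unrolled
def solution_alt (survey : List String) (choices : List Int) : String :=
  String.ofList
    [(if scoreB survey choices 'T' ≤ scoreB survey choices 'R' then 'R' else 'T'),
     (if scoreB survey choices 'F' ≤ scoreB survey choices 'C' then 'C' else 'F'),
     (if scoreB survey choices 'M' ≤ scoreB survey choices 'J' then 'J' else 'M'),
     (if scoreB survey choices 'N' ≤ scoreB survey choices 'A' then 'A' else 'N')]

-- ===== PRECONDITION & SPEC =====
-- Pre_ excludes exactly the inputs where A raises: choices shorter than survey (IndexError),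
-- a survey item too short for the index its choice selects (IndexError), or a selected letter
-- outside A's eight dict keys (KeyError).
def Pre_solution (survey : List String) (choices : List Int) : Prop :=
  survey.length ≤ choices.length ∧
  ∀ p ∈ survey.zip choices,
    (p.2 < 4 → (p.1.toList[0]?.any (fun ch => ch ∈ pvKeys)) = true) ∧
    (4 < p.2 → (p.1.toList[1]?.any (fun ch => ch ∈ pvKeys)) = true)
instance (survey : List String) (choices : List Int) : Decidable (Pre_solution survey choices) := by
  unfold Pre_solution; infer_instance

def pvWitness_solution : List String × List Int := (["RT", "TR", "CF", "AN"], [1, 7, 4, 5])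

def Spec_solution (survey : List String) (choices : List Int) (out : String) : Prop := out = solution_alt survey choices
instance (survey : List String) (choices : List Int) (out : String) : Decidable (Spec_solution survey choices out) := by unfold Spec_solution; infer_instance

-- ===== CLAIM (what is proved, stated in full; the proofs are below) =====
def Claim_equal_solution : Prop := ∀ (survey : List String) (choices : List Int), Dom_solution survey choices → Pre_solution survey choices → Spec_solution survey choices (solution survey choices)

-- ===== LEMMAS AND PROOFS =====

-- an index loop 'for i in range(len(xs))' reading xs[i] and ys[i] is a loop over zip when ys is long enough
theorem foldl_range_two_getD {α β γ : Type} (f : α → β → γ → α) (dx : β) (dy : γ) :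
    ∀ (xs : List β) (ys : List γ), xs.length ≤ ys.length → ∀ (init : α),
    (List.range xs.length).foldl (fun acc i => f acc (xs.getD i dx) (ys.getD i dy)) init
      = (xs.zip ys).foldl (fun acc p => f acc p.1 p.2) init := by
  intro xs
  induction xs with
  | nil => intro ys _ init; simp
  | cons x xt ih =>
    intro ys hlen init
    cases ys with
    | nil => simp at hlen
    | cons y yt =>
      simp only [List.length_cons, List.range_succ_eq_map, List.foldl_cons, List.foldl_map,
        List.getD_cons_zero, List.getD_cons_succ, List.zip_cons_cons]
      exact ih yt (by simpa using hlen) (f init x y)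

-- the (signed, per-letter) contribution of one (s, c) pair to letter k's score
def contrib (p : String × Int) (k : Char) : Int :=
  (if p.2 < 4 ∧ p.1.toList[0]? = some k then 4 - p.2 else 0)
  + (if 4 < p.2 ∧ p.1.toList[1]? = some k then p.2 - 4 else 0)

-- contrib written with the boolean guards B's filters use
theorem contrib_eq (p : String × Int) (k : Char) :
    contrib p k
      = (if (decide (p.2 < 4) && (p.1.toList[0]? == some k)) = true then 4 - p.2 else 0)
        + (if (decide (4 < p.2) && (p.1.toList[1]? == some k)) = true then p.2 - 4 else 0) := by
  simp [contrib, Bool.and_eq_true]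

-- B's two filtered sums are the sum of per-pair contributions
theorem score_sum (k : Char) : ∀ l : List (String × Int),
    (((l.filter (fun p => decide (p.2 < 4) && (p.1.toList[0]? == some k))).map (fun p => 4 - p.2)).sum
      + ((l.filter (fun p => decide (4 < p.2) && (p.1.toList[1]? == some k))).map (fun p => p.2 - 4)).sum)
    = (l.map (fun p => contrib p k)).sum := by
  intro l
  induction l with
  | nil => simp
  | cons p t ih =>
    rw [List.map_cons, List.sum_cons, contrib_eq p k]
    simp only [List.filter_cons]
    cases e1 : (decide (p.2 < 4) && (p.1.toList[0]? == some k)) <;>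
      cases e2 : (decide (4 < p.2) && (p.1.toList[1]? == some k)) <;>
      simp only [Bool.false_eq_true, if_false, if_true, List.map_cons, List.sum_cons] <;>
      omega

theorem scoreB_eq_sum (survey : List String) (choices : List Int) (k : Char) :
    scoreB survey choices k = ((survey.zip choices).map (fun p => contrib p k)).sum := by
  unfold scoreB
  exact score_sum k (survey.zip choices)

-- A's step changes letter k's counter by exactly contrib (s, c) k
theorem stepA_getD (typ : PySem.Dict Char Int) (s : String) (c : Int) (k : Char) :
    (stepA typ s c).getD k 0 = typ.getD k 0 + contrib (s, c) k := by
  unfold stepA contrib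
  by_cases h1 : c < 4
  · have h2 : ¬ 4 < c := by omega
    cases e : s.toList[0]? with
    | none => simp [h1, h2]
    | some ch =>
      simp only [if_pos h1, PySem.Dict.getD_modify]
      by_cases hk : k = ch
      · subst hk; simp [h1, h2]
      · have hk' : ¬ ch = k := fun h => hk h.symm
        simp [hk, hk', h2]
  · by_cases h2 : 4 < c
    · cases e : s.toList[1]? with
      | none => simp [h1, h2]
      | some ch =>
        simp only [if_neg h1, if_pos h2, PySem.Dict.getD_modify]
        by_cases hk : k = ch
        · subst hk; simp [h1, h2]
        · have hk' : ¬ ch = k := fun h => hk h.symm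
          simp [hk, hk', h1, h2]
    · simp [h1, h2]

-- folding A's step over the pairs adds the total contribution to each counter
theorem foldl_stepA_getD (l : List (String × Int)) :
    ∀ (typ : PySem.Dict Char Int) (k : Char),
      (l.foldl (fun t p => stepA t p.1 p.2) typ).getD k 0
        = typ.getD k 0 + (l.map (fun p => contrib p k)).sum := by
  induction l with
  | nil => intro typ k; simp
  | cons p t ih =>
    intro typ k
    cases p with
    | mk s c =>
      simp only [List.foldl_cons, List.map_cons, List.sum_cons, ih, stepA_getD]
      omega

-- ===== VERDICT (by name: the statement is the Claim_ definition above) =====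
set_option maxRecDepth 4096 in
theorem solution_spec : Claim_equal_solution := by
  intro survey choices _ hpre
  obtain ⟨hlen, _⟩ := hpre
  unfold Spec_solution solution solution_alt
  have hzip : (PySem.List.pyRange 0 (survey.length : Int) 1).foldl
      (fun typ i => stepA typ (PySem.List.pyGetD survey i "") (PySem.List.pyGetD choices i 0))
      (PySem.Dict.ofList [('R', 0), ('T', 0), ('C', 0), ('F', 0), ('J', 0), ('M', 0), ('A', 0), ('N', 0)])
      = (survey.zip choices).foldl (fun t p => stepA t p.1 p.2)
        (PySem.Dict.ofList [('R', 0), ('T', 0), ('C', 0), ('F', 0), ('J', 0), ('M', 0), ('A', 0), ('N', 0)]) := by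
    rw [PySem.List.pyRange_zero_nat, List.foldl_map]
    simp only [PySem.List.pyGetD_natCast]
    exact foldl_range_two_getD _ _ _ survey choices hlen _
  simp only [hzip]
  have hget : ∀ k ∈ pvKeys,
      ((survey.zip choices).foldl (fun t p => stepA t p.1 p.2)
        (PySem.Dict.ofList [('R', 0), ('T', 0), ('C', 0), ('F', 0), ('J', 0), ('M', 0), ('A', 0), ('N', 0)])).getD k 0
      = scoreB survey choices k := by
    intro k hk
    have h0 : ∀ k ∈ pvKeys, (PySem.Dict.ofList [('R', (0:Int)), ('T', 0), ('C', 0), ('F', 0), ('J', 0), ('M', 0), ('A', 0), ('N', 0)]).getD k 0 = 0 := by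
      intro k hk; fin_cases hk <;> rfl
    rw [foldl_stepA_getD, h0 k hk, scoreB_eq_sum, zero_add]
  unfold decisionA
  rw [hget 'R' (by decide), hget 'T' (by decide), hget 'C' (by decide), hget 'F' (by decide),
      hget 'J' (by decide), hget 'M' (by decide), hget 'A' (by decide), hget 'N' (by decide)]
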